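-- pv_equiv track=rewrite | github.com/michaelpalych/TPsegalilya | matrix — копия.py | compute_result
-- ===== SOURCE A (Python) =====
-- def transpose(m):
--     return [list(row) for row in zip(*m)]
--
-- def compute_result(A, F, K):
--     n = len(A)
--     A_T = transpose(A)
--     F_T = transpose(F)
--
--     KA_T = [[K * A_T[i][j] for j in range(n)] for i in range(n)]
--     left = [[sum(KA_T[i][k] * A[k][j] for k in range(n)) for j in range(n)] for i in range(n)]
--     right = [[K * F_T[i][j] for j in range(n)] for i in range(n)]
--     res = [[left[i][j] - right[i][j] for j in range(n)] for i in range(n)]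
--     return res
-- ===== SOURCE B (Python) =====
-- def compute_result(A, F, K):
--     # K*A^T*A - K*F^T computed as rank-1 outer-product accumulation:
--     # start from -K*F^T and, for each row r of A, add the outer product
--     # of (K*r) with r.  One pass over rows, no inner summation loop.
--     n = len(A)
--     res = [[-K * F[j][i] for j in range(n)] for i in range(n)]
--     for row in A:
--         res = [[res[i][j] + K * row[i] * row[j] for j in range(n)]
--                for i in range(n)]
--     return res
-- ===== Notes on version B (the rewrite author's own statement) =====
-- stated objective: alternative
-- what changed: Replaces the transpose/matrix-multiply pipeline (build A_T, F_T, KA_T, then a triple loop with an inner k-sum) by rank-1 outer-product accumulation: start from -K*F^T and fold each row r of A into the accumulator by adding the outer product (K*r)r; there is no transpose and no inner summation loop.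
import Mathlib
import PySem

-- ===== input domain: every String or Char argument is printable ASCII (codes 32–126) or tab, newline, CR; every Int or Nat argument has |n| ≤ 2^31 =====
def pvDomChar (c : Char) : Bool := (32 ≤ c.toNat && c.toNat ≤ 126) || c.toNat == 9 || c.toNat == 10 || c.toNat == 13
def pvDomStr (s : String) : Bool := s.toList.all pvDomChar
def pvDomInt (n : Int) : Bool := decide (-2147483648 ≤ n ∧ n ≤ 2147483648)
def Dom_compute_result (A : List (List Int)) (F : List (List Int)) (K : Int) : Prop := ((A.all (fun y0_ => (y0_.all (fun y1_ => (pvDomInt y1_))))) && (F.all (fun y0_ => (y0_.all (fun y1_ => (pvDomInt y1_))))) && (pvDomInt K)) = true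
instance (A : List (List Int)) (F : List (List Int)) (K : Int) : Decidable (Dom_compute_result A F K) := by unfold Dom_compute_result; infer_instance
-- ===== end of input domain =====

-- B replaces the transpose/matrix-multiply pipeline by rank-1 outer-product accumulation:
-- starting from -K*F^T, each row r of A adds the outer product (K*r)r (objective: alternative).

-- ===== PORT A =====
-- transpose(m) = [list(row) for row in zip(*m)]: zip(*m) iterates column index j
-- up to the length of the SHORTEST row (0 for m = []); exact on that behaviour.
def pyTranspose (m : List (List Int)) : List (List Int) :=
  (List.range (((m.map List.length).min?).getD 0)).map
    (fun j => m.map (fun row => row.getD j 0))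

def compute_result (A : List (List Int)) (F : List (List Int)) (K : Int) : List (List Int) :=
  let n := A.length
  let A_T := pyTranspose A
  let F_T := pyTranspose F
  let KA_T := (List.range n).map (fun i => (List.range n).map (fun j => K * ((A_T.getD i []).getD j 0)))
  let left := (List.range n).map (fun i => (List.range n).map (fun j =>
      ((List.range n).map (fun k => ((KA_T.getD i []).getD k 0) * ((A.getD k []).getD j 0))).sum))
  let right := (List.range n).map (fun i => (List.range n).map (fun j => K * ((F_T.getD i []).getD j 0)))
  (List.range n).map (fun i => (List.range n).map (fun j =>
      ((left.getD i []).getD j 0) - ((right.getD i []).getD j 0)))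

-- ===== PORT B =====
-- one fold over the rows of A, rebuilding the accumulator matrix each step (as Source B does)
def compute_result_alt (A : List (List Int)) (F : List (List Int)) (K : Int) : List (List Int) :=
  let n := A.length
  let init := (List.range n).map (fun i => (List.range n).map (fun j => -K * ((F.getD j []).getD i 0)))
  A.foldl (fun res row =>
    (List.range n).map (fun i => (List.range n).map (fun j =>
      ((res.getD i []).getD j 0) + K * (row.getD i 0) * (row.getD j 0)))) init

-- ===== PRECONDITION & SPEC =====
-- Pre_ = exactly the inputs where A's indexing never raises IndexError: with n = len(A),
-- every row of A has length ≥ n, F has ≥ n rows, and every row of F has length ≥ n.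
def Pre_compute_result (A : List (List Int)) (F : List (List Int)) (K : Int) : Prop :=
  (∀ r ∈ A, A.length ≤ r.length) ∧ A.length ≤ F.length ∧ (∀ r ∈ F, A.length ≤ r.length)
instance (A : List (List Int)) (F : List (List Int)) (K : Int) : Decidable (Pre_compute_result A F K) := by unfold Pre_compute_result; infer_instance

def pvWitness_compute_result : List (List Int) × List (List Int) × Int :=
  ([[1, 2], [3, 4]], [[0, 1], [2, 3]], 2)

def Spec_compute_result (A : List (List Int)) (F : List (List Int)) (K : Int) (out : List (List Int)) : Prop := out = compute_result_alt A F K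
instance (A : List (List Int)) (F : List (List Int)) (K : Int) (out : List (List Int)) : Decidable (Spec_compute_result A F K out) := by unfold Spec_compute_result; infer_instance

-- ===== CLAIM (what is proved, stated in full; the proofs are below) =====
def Claim_equal_compute_result : Prop := ∀ (A : List (List Int)) (F : List (List Int)) (K : Int), Dom_compute_result A F K → Pre_compute_result A F K → Spec_compute_result A F K (compute_result A F K)

-- ===== LEMMAS AND PROOFS =====

theorem getD_map_range {α : Type} (f : ℕ → α) (n i : ℕ) (d : α) (h : i < n) :
    (((List.range n).map f).getD i d) = f i := by
  simp [List.getD, h]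

theorem getD_map_lt {α β : Type} (l : List α) (g : α → β) (j : ℕ) (d : β) (d' : α)
    (h : j < l.length) : (l.map g).getD j d = g (l.getD j d') := by
  rw [List.getD_eq_getElem _ _ (by simpa using h), List.getD_eq_getElem _ _ h]
  simp

-- under the row-length bounds, (pyTranspose m)[i][j] = m[j][i]
theorem pyTranspose_get (m : List (List Int)) (i j : ℕ)
    (hi : ∀ r ∈ m, i < r.length) (hj : j < m.length) :
    ((pyTranspose m).getD i []).getD j 0 = (m.getD j []).getD i 0 := by
  obtain ⟨a, ha⟩ : ∃ a, (m.map List.length).min? = some a := by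
    cases h : (m.map List.length).min? with
    | none =>
        exfalso
        have h0 : m = [] := by simpa using List.min?_eq_none_iff.mp h
        subst h0; simp at hj
    | some a => exact ⟨a, rfl⟩
  obtain ⟨r, hr, hlen⟩ := List.mem_map.mp (List.min?_mem ha)
  have hik : i < ((m.map List.length).min?).getD 0 := by
    rw [ha]; simpa using hlen ▸ hi r hr
  unfold pyTranspose
  rw [getD_map_range _ _ _ _ hik, getD_map_lt m _ j 0 [] hj]

-- B's fold, started from an n×n matrix given entrywise by m, ends at the matrix whose
-- (i,j) entry is m i j plus the accumulated outer-product terms of all rows of L.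
theorem foldl_outer (n : ℕ) (K : Int) (L : List (List Int)) (m : ℕ → ℕ → Int) :
    L.foldl (fun res row =>
        (List.range n).map (fun i => (List.range n).map (fun j =>
          ((res.getD i []).getD j 0) + K * (row.getD i 0) * (row.getD j 0))))
      ((List.range n).map (fun i => (List.range n).map (fun j => m i j)))
    = (List.range n).map (fun i => (List.range n).map (fun j =>
        m i j + (L.map (fun r => K * (r.getD i 0) * (r.getD j 0))).sum)) := by
  induction L generalizing m with
  | nil => simp
  | cons r L ih =>
      rw [List.foldl_cons]
      have hstep : ((List.range n).map (fun i => (List.range n).map (fun j =>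
            ((((List.range n).map (fun i => (List.range n).map (fun j => m i j))).getD i []).getD j 0)
              + K * (r.getD i 0) * (r.getD j 0))))
          = (List.range n).map (fun i => (List.range n).map (fun j =>
              (fun i j => m i j + K * (r.getD i 0) * (r.getD j 0)) i j)) := by
        apply List.map_congr_left; intro i hi
        apply List.map_congr_left; intro j hj
        rw [getD_map_range _ _ _ _ (List.mem_range.mp hi),
            getD_map_range _ _ _ _ (List.mem_range.mp hj)]
      rw [hstep, ih]
      apply List.map_congr_left; intro i _
      apply List.map_congr_left; intro j _
      simp [add_assoc]

theorem compute_result_eq (A : List (List Int)) (F : List (List Int)) (K : Int)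
    (hPre : Pre_compute_result A F K) :
    compute_result A F K = compute_result_alt A F K := by
  obtain ⟨hA, hFlen, hF⟩ := hPre
  unfold compute_result compute_result_alt
  simp only []
  rw [foldl_outer]
  apply List.map_congr_left
  intro i hi
  have hi' : i < A.length := List.mem_range.mp hi
  apply List.map_congr_left
  intro j hj
  have hj' : j < A.length := List.mem_range.mp hj
  rw [getD_map_range (fun i => (List.range A.length).map (fun j =>
        ((List.range A.length).map (fun k =>
          ((((List.range A.length).map (fun i => (List.range A.length).map
              (fun j => K * ((pyTranspose A).getD i []).getD j 0))).getD i []).getD k 0)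
            * ((A.getD k []).getD j 0))).sum)) _ _ _ hi',
      getD_map_range _ _ _ _ hj',
      getD_map_range (fun i => (List.range A.length).map
        (fun j => K * ((pyTranspose F).getD i []).getD j 0)) _ _ _ hi',
      getD_map_range _ _ _ _ hj']
  rw [pyTranspose_get F i j (fun r hr => lt_of_lt_of_le hi' (hF r hr)) (by omega)]
  -- left side: Σ_k - K*F[j][i]; right side: -K*F[j][i] + Σ_rows
  have hsum : ((List.range A.length).map (fun k =>
        ((((List.range A.length).map (fun i => (List.range A.length).map
            (fun j => K * ((pyTranspose A).getD i []).getD j 0))).getD i []).getD k 0)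
          * ((A.getD k []).getD j 0))).sum
      = (A.map (fun r => K * (r.getD i 0) * (r.getD j 0))).sum := by
    congr 1
    apply List.ext_getElem (by simp)
    intro k hk1 hk2
    simp only [List.getElem_map, List.getElem_range]
    have hk : k < A.length := by simpa using hk2
    rw [getD_map_range (fun i => (List.range A.length).map
          (fun j => K * ((pyTranspose A).getD i []).getD j 0)) _ _ _ hi',
        getD_map_range _ _ _ _ hk,
        pyTranspose_get A i k (fun r hr => lt_of_lt_of_le hi' (hA r hr)) hk]
    rw [List.getD_eq_getElem _ _ hk]
  rw [hsum]
  ring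

-- ===== VERDICT (by name: the statement is the Claim_ definition above) =====
theorem compute_result_spec : Claim_equal_compute_result := by
  intro A F K _ hPre
  unfold Spec_compute_result
  exact compute_result_eq A F K hPre
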